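-- pv_equiv track=rewrite | github.com/escobarflughafen/GraphQLer2022 | dependency_test.py | get_mutation_list
-- ===== SOURCE A (Python) =====
-- def get_mutation_list(data_json, data_type):
--
--     # Get lists of mutation name.
--     mutation_name = ["createMessage", "updateMessage", "deleteMessage"] # TODO!!!! need to know the json format.
--
--     mutation_list = []
--     for mn in mutation_name:
--             for d in data_json:
--                 if d['name'] == mn:
--                     mutation_list.append(d)
--     return mutation_list
-- ===== SOURCE B (Python) =====
-- def get_mutation_list(data_json, data_type):
--     # One grouping pass over data_json, then gather the three fixed names in order.
--     groups = {}
--     for d in data_json: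
--         groups.setdefault(d['name'], []).append(d)
--     return (groups.get("createMessage", [])
--             + groups.get("updateMessage", [])
--             + groups.get("deleteMessage", []))
-- ===== Notes on version B (the rewrite author's own statement) =====
-- stated objective: idiomatic
-- what changed: Replaces the three repeated scans of data_json (one per fixed mutation name) by a single grouping pass building a name-indexed dict, then concatenates the groups for the three fixed names in order.
import Mathlib
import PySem

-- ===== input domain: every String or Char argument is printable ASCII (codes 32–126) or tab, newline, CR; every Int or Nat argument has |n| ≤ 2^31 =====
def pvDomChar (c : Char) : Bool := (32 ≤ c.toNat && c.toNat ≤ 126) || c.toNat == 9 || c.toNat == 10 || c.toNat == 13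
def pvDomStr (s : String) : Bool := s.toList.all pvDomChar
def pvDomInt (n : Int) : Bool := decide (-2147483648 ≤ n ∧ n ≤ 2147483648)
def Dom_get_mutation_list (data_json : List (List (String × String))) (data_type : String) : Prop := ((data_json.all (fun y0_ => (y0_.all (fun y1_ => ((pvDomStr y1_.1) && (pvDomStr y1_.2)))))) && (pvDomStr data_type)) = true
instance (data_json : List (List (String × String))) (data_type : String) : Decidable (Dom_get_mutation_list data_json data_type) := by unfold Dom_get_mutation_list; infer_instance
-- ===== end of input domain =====

-- B replaces A's three scans of data_json by one grouping pass plus a gather of the three fixed names.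
-- ===== PORT A =====
-- shared primitive: d['name'] on an entry dict (none = KeyError, excluded by Pre_)
def gmlName (d : List (String × String)) : Option String :=
  PySem.Dict.get? (PySem.Dict.mk d) "name"

-- B replaces A's three scans of data_json by one grouping pass plus a gather of the three fixed names.
def get_mutation_list (data_json : List (List (String × String))) (data_type : String) : List (List (String × String)) :=
  ["createMessage", "updateMessage", "deleteMessage"].foldl
    (fun mutation_list mn =>
      data_json.foldl
        (fun mutation_list d =>
          if gmlName d = some mn then mutation_list ++ [d] else mutation_list)
        mutation_list)
    []

-- ===== PORT B =====
-- one grouping step: groups.setdefault(d['name'], []).append(d); a missing 'name' key raises in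
-- Python (excluded by Pre_) and is skipped here
def gmlStep (g : PySem.Dict String (List (List (String × String)))) (d : List (String × String)) :
    PySem.Dict String (List (List (String × String))) :=
  match gmlName d with
  | some k => PySem.Dict.insert g k (PySem.Dict.getD g k [] ++ [d])
  | none => g

def get_mutation_list_alt (data_json : List (List (String × String))) (data_type : String) : List (List (String × String)) :=
  let groups := data_json.foldl gmlStep PySem.Dict.empty
  PySem.Dict.getD groups "createMessage" [] ++ PySem.Dict.getD groups "updateMessage" []
    ++ PySem.Dict.getD groups "deleteMessage" []

-- ===== PRECONDITION & SPEC =====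
-- Pre_ excludes exactly the inputs where some entry lacks the key 'name', on which Python raises KeyError.
def Pre_get_mutation_list (data_json : List (List (String × String))) (data_type : String) : Prop :=
  ∀ d ∈ data_json, (gmlName d).isSome
instance (data_json : List (List (String × String))) (data_type : String) : Decidable (Pre_get_mutation_list data_json data_type) := by unfold Pre_get_mutation_list; infer_instance
def pvWitness_get_mutation_list : (List (List (String × String))) × String :=
  ([[("name", "createMessage"), ("v", "1")], [("name", "updateMessage")]], "t")
def Spec_get_mutation_list (data_json : List (List (String × String))) (data_type : String) (out : List (List (String × String))) : Prop := out = get_mutation_list_alt data_json data_type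
instance (data_json : List (List (String × String))) (data_type : String) (out : List (List (String × String))) : Decidable (Spec_get_mutation_list data_json data_type out) := by unfold Spec_get_mutation_list; infer_instance

-- ===== CLAIM (what is proved, stated in full; the proofs are below) =====
def Claim_equal_get_mutation_list : Prop := ∀ (data_json : List (List (String × String))) (data_type : String), Dom_get_mutation_list data_json data_type → Pre_get_mutation_list data_json data_type → Spec_get_mutation_list data_json data_type (get_mutation_list data_json data_type)

-- ===== LEMMAS AND PROOFS =====

-- the group stored under mn after folding over l is the old group followed by l's matching entries
theorem gml_getD_foldl (l : List (List (String × String))) :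
    ∀ (g : PySem.Dict String (List (List (String × String)))) (mn : String),
      PySem.Dict.getD (l.foldl gmlStep g) mn []
        = PySem.Dict.getD g mn [] ++ l.filter (fun d => decide (gmlName d = some mn)) := by
  induction l with
  | nil => intro g mn; simp
  | cons d t ih =>
    intro g mn
    simp only [List.foldl_cons, List.filter_cons]
    cases h : gmlName d with
    | none => simp [gmlStep, h, ih]
    | some k =>
      rw [ih]
      by_cases hmk : mn = k
      · subst hmk
        simp [gmlStep, h, PySem.Dict.getD_insert_self]
      · rw [gmlStep, h]
        simp only []
        rw [PySem.Dict.getD_insert]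
        simp [hmk]
        exact fun h => hmk h.symm

-- ===== VERDICT (by name: the statement is the Claim_ definition above) =====
theorem get_mutation_list_spec : Claim_equal_get_mutation_list := by
  intro data_json data_type _ _
  unfold Spec_get_mutation_list get_mutation_list get_mutation_list_alt
  simp only [List.foldl_cons, List.foldl_nil, gml_getD_foldl, PySem.Dict.getD_empty,
    List.nil_append]
  rw [PySem.List.foldl_append_ite_eq_filter, PySem.List.foldl_append_ite_eq_filter,
    PySem.List.foldl_append_ite_eq_filter]
  simp
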